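-- pv_equiv track=rewrite | github.com/emma-hockett/4365assignment2 | main.py | selectMostConstrained
-- ===== SOURCE A (Python) =====
-- def selectMostConstrained(vars, cons, assignment):
--     smallestDomainSize = float('inf')
--     tiedVars = {}
--
--     # Find the most constrained variables (the fewest domain values)
--     for var in vars:
--         if var not in assignment:
--             domainSize = len(vars[var])
--             if domainSize < smallestDomainSize:
--                 smallestDomainSize = domainSize
--                 tiedVars = {var: vars[var]}  # Clear and add most constrained
--             elif domainSize == smallestDomainSize:
--                 tiedVars[var] = vars[var]
--
--     # No tie present, return the most constrained variable
--     if len(tiedVars) == 1: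
--         return next(iter(tiedVars))
--
--     # Apply most constraining heuristic to break ties
--     constraintCount = {var: 0 for var in tiedVars}
--
--     for con in cons:
--         var1, _, var2 = con
--         if var1 in tiedVars and var2 not in assignment:
--             constraintCount[var1] += 1
--         if var2 in tiedVars and var1 not in assignment:
--             constraintCount[var2] += 1
--
--     # Find the most constraining variable
--     mostConstrainedVar = max(constraintCount, key=constraintCount.get)
--
--     return mostConstrainedVar
-- ===== SOURCE B (Python) =====
-- def selectMostConstrained(variables, cons, assignment):
--     # Constraint degree of every variable: number of constraints pairing it
--     # with an unassigned partner (a self-constraint on an unassigned variable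
--     # contributes from both ends).
--     degree = {}
--     for v1, _, v2 in cons:
--         if v2 not in assignment:
--             degree[v1] = degree.get(v1, 0) + 1
--         if v1 not in assignment:
--             degree[v2] = degree.get(v2, 0) + 1
--
--     # One pass: smallest domain first, larger degree breaks ties,
--     # earlier variable wins a full tie.
--     best = None  # (variable, domain size, degree)
--     for var, domain in variables.items():
--         if var in assignment:
--             continue
--         d = len(domain)
--         g = degree.get(var, 0)
--         if best is None or d < best[1] or (d == best[1] and g > best[2]):
--             best = (var, d, g)
--
--     if best is None:
--         raise ValueError("all variables are assigned")
--     return best[0]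
-- ===== Notes on version B (the rewrite author's own statement) =====
-- stated objective: alternative
-- what changed: Replaced A's collect-the-tied-variables / re-count-constraints-for-ties / max staging with a global constraint-degree table built in one pass over cons followed by a single lexicographic (domain size, then degree) selection pass over vars; Pre_ excludes vars lists with duplicate keys (they do not faithfully represent a Python dict, which collapses them) and inputs whose variables are all assigned (A's max over an empty dict raises ValueError, B raises ValueError too).
import Mathlib
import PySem

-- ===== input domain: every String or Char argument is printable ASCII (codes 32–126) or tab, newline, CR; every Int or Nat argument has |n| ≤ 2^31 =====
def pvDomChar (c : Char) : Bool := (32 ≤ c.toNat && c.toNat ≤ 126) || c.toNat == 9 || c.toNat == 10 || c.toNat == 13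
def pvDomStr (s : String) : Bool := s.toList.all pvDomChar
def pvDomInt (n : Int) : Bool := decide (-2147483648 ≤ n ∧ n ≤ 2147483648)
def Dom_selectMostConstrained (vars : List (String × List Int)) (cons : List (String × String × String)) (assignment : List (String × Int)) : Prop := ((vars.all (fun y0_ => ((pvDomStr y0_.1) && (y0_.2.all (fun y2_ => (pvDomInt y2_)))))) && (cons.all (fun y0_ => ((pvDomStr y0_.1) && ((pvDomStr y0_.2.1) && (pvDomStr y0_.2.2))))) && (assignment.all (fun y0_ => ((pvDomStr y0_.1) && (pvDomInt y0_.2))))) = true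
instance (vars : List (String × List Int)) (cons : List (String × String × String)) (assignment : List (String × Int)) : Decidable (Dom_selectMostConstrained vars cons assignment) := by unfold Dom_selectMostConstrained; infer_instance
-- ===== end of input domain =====

-- B replaces A's collect-ties / re-count / max staging by a global constraint-degree
-- table built once from cons plus a single lexicographic selection pass over vars
-- (objective: alternative decomposition). Proved equal on Pre_ (nodup vars keys,
-- at least one unassigned variable).

-- 'v not in assignment' (Python dict-key membership), used by both ports
def pvNotAssigned (assignment : List (String × Int)) (v : String) : Bool :=
  !(assignment.any (fun q => q.1 == v))

-- ===== PORT A =====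
-- A's first loop: smallest domain size seen so far (none = float('inf')) and the tiedVars dict
def pvTieStep (assignment : List (String × Int))
    (st : Option Nat × List (String × List Int)) (p : String × List Int) :
    Option Nat × List (String × List Int) :=
  if pvNotAssigned assignment p.1 then
    match st with
    | (none, _) => (some p.2.length, [p])
    | (some m, tied) =>
      if p.2.length < m then (some p.2.length, [p])
      else if p.2.length = m then (some m, tied ++ [p])
      else (some m, tied)
  else st

-- A's second loop body: one guarded increment of constraintCount ...
def pvBumpIf (assignment : List (String × Int)) (tied : List (String × List Int))
    (v partner : String) (table : List (String × Nat)) : List (String × Nat) :=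
  if tied.any (fun q => q.1 == v) && pvNotAssigned assignment partner
  then table.map (fun q => if q.1 == v then (q.1, q.2 + 1) else q) else table

-- ... and the two increments of one constraint, in statement order
def pvConStep (assignment : List (String × Int)) (tied : List (String × List Int))
    (table : List (String × Nat)) (con : String × String × String) : List (String × Nat) :=
  pvBumpIf assignment tied con.2.2 con.1 (pvBumpIf assignment tied con.1 con.2.2 table)

def selectMostConstrained (vars : List (String × List Int)) (cons : List (String × String × String)) (assignment : List (String × Int)) : String :=
  let st := vars.foldl (pvTieStep assignment) (none, [])
  let tied := st.2
  if tied.length == 1 then (tied.headD ("", [])).1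
  else
    let table := cons.foldl (pvConStep assignment tied) (tied.map (fun p => (p.1, 0)))
    match PySem.List.max? table (fun q => q.2) with
    | some q => q.1
    | none => ""   -- Python: max over the empty dict raises ValueError (outside Pre_)

-- ===== PORT B =====
-- B's degree table: for every constraint, each endpoint whose partner is unassigned gains one
def pvDegStep (assignment : List (String × Int))
    (d : PySem.Dict String Nat) (con : String × String × String) : PySem.Dict String Nat :=
  let d1 := if pvNotAssigned assignment con.2.2
            then d.insert con.1 (d.getD con.1 0 + 1) else d
  if pvNotAssigned assignment con.1
  then d1.insert con.2.2 (d1.getD con.2.2 0 + 1) else d1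

-- B's selection pass: keep (var, domain size, degree), smaller domain first, larger degree second
def pvBestStep (assignment : List (String × Int)) (deg : PySem.Dict String Nat)
    (best : Option (String × Nat × Nat)) (p : String × List Int) : Option (String × Nat × Nat) :=
  if pvNotAssigned assignment p.1 then
    let g := deg.getD p.1 0
    match best with
    | none => some (p.1, p.2.length, g)
    | some (bv, bd, bg) =>
      if p.2.length < bd ∨ (p.2.length = bd ∧ bg < g) then some (p.1, p.2.length, g)
      else some (bv, bd, bg)
  else best

def selectMostConstrained_alt (vars : List (String × List Int)) (cons : List (String × String × String)) (assignment : List (String × Int)) : String :=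
  let deg := cons.foldl (pvDegStep assignment) PySem.Dict.empty
  match vars.foldl (pvBestStep assignment deg) none with
  | some b => b.1
  | none => ""   -- Python B raises ValueError here (outside Pre_)

-- ===== PRECONDITION & SPEC =====
-- Pre_ excludes (a) vars lists with duplicate keys, which do not represent a Python dict
-- faithfully (dict construction collapses them), and (b) inputs with no unassigned
-- variable, on which A's max over an empty dict raises ValueError (B raises there too).
def Pre_selectMostConstrained (vars : List (String × List Int)) (cons : List (String × String × String)) (assignment : List (String × Int)) : Prop :=
  (vars.map Prod.fst).Nodup ∧
  vars.any (fun p => !(assignment.any (fun q => q.1 == p.1))) = true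
instance (vars : List (String × List Int)) (cons : List (String × String × String)) (assignment : List (String × Int)) : Decidable (Pre_selectMostConstrained vars cons assignment) := by unfold Pre_selectMostConstrained; infer_instance

def pvWitness_selectMostConstrained : (List (String × List Int)) × (List (String × String × String)) × (List (String × Int)) :=
  ([("a", [1]), ("b", [1, 2])], [("a", "!=", "b")], [])

def Spec_selectMostConstrained (vars : List (String × List Int)) (cons : List (String × String × String)) (assignment : List (String × Int)) (out : String) : Prop := out = selectMostConstrained_alt vars cons assignment
instance (vars : List (String × List Int)) (cons : List (String × String × String)) (assignment : List (String × Int)) (out : String) : Decidable (Spec_selectMostConstrained vars cons assignment out) := by unfold Spec_selectMostConstrained; infer_instance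

-- ===== CLAIM (what is proved, stated in full; the proofs are below) =====
def Claim_equal_selectMostConstrained : Prop := ∀ (vars : List (String × List Int)) (cons : List (String × String × String)) (assignment : List (String × Int)), Dom_selectMostConstrained vars cons assignment → Pre_selectMostConstrained vars cons assignment → Spec_selectMostConstrained vars cons assignment (selectMostConstrained vars cons assignment)

-- ===== LEMMAS AND PROOFS =====

-- the constraint degree of a variable, as a pure sum over cons
def pvCnt (assignment : List (String × Int)) (cons : List (String × String × String)) (v : String) : Nat :=
  (cons.map (fun c =>
    (if c.1 == v && pvNotAssigned assignment c.2.2 then 1 else 0) +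
    (if c.2.2 == v && pvNotAssigned assignment c.1 then 1 else 0))).sum

-- B's degree dict computes pvCnt
theorem pvDeg_getD (assignment : List (String × Int)) (cons : List (String × String × String))
    (d : PySem.Dict String Nat) (v : String) :
    (cons.foldl (pvDegStep assignment) d).getD v 0 = d.getD v 0 + pvCnt assignment cons v := by
  induction cons generalizing d with
  | nil => simp [pvCnt]
  | cons c rest ih =>
    obtain ⟨a, bm, b⟩ := c
    rw [List.foldl_cons, ih]
    have hstep : (pvDegStep assignment d (a, bm, b)).getD v 0 = d.getD v 0 +
        ((if a == v && pvNotAssigned assignment b then 1 else 0) +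
         (if b == v && pvNotAssigned assignment a then 1 else 0)) := by
      unfold pvDegStep
      by_cases e3 : a = b
      · subst e3
        by_cases e1 : v = a
        · subst e1
          by_cases h : pvNotAssigned assignment v = true <;>
            simp [h, PySem.Dict.getD_insert]
        · have n1 : (a == v) = false := beq_eq_false_iff_ne.mpr (Ne.symm e1)
          by_cases h : pvNotAssigned assignment a = true <;>
            simp [h, PySem.Dict.getD_insert, e1, n1]
      · have e3' : ¬ b = a := fun hh => e3 hh.symm
        by_cases h2 : pvNotAssigned assignment b = true <;>
        by_cases h1 : pvNotAssigned assignment a = true <;>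
        by_cases e1 : v = a <;> by_cases e2 : v = b <;>
          [skip; skip; skip; skip; skip; skip; skip; skip; skip; skip; skip; skip; skip; skip; skip; skip] <;>
        · have n1 : (a == v) = (decide (v = a)) := by
            by_cases hv : v = a
            · subst hv; simp
            · simp [hv, beq_eq_false_iff_ne.mpr (Ne.symm hv)]
          have n2 : (b == v) = (decide (v = b)) := by
            by_cases hv : v = b
            · subst hv; simp
            · simp [hv, beq_eq_false_iff_ne.mpr (Ne.symm hv)]
          simp only [h1, h2, if_true, if_false, Bool.and_true, Bool.and_false,
            PySem.Dict.getD_insert, e3', n1, n2, e1, e2, decide_true, decide_false,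
            if_true, if_false, Bool.true_and, Bool.false_and]
          first
          | omega
          | (simp [PySem.Dict.getD_insert, e3, e3', e1, e2] <;> omega)
          | (simp [PySem.Dict.getD_insert, e3, e3', e1, e2])
    rw [hstep]
    simp [pvCnt]
    omega

-- a guarded bump on a table shaped over tied
theorem pvBumpIf_shaped (assignment : List (String × Int)) (tied : List (String × List Int))
    (f : String → Nat) (v partner : String) :
    pvBumpIf assignment tied v partner (tied.map (fun p => (p.1, f p.1)))
    = tied.map (fun p => (p.1, f p.1 +
        (if v == p.1 && pvNotAssigned assignment partner then 1 else 0))) := by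
  unfold pvBumpIf
  by_cases hb : pvNotAssigned assignment partner = true
  · by_cases hg : tied.any (fun q => q.1 == v) = true
    · rw [if_pos (by simp [hg, hb]), List.map_map]
      refine List.map_congr_left fun p hp => ?_
      by_cases e : p.1 = v
      · simp [Function.comp, e, hb]
      · have h1 : (p.1 == v) = false := beq_eq_false_iff_ne.mpr e
        have h2 : (v == p.1) = false := beq_eq_false_iff_ne.mpr (Ne.symm e)
        simp [Function.comp, h1, h2]
    · rw [if_neg (by simp [hg])]
      refine List.map_congr_left fun p hp => ?_
      have e : ¬ p.1 = v := by
        intro hh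
        exact hg (List.any_eq_true.mpr ⟨p, hp, by simp [hh]⟩)
      have h2 : (v == p.1) = false := beq_eq_false_iff_ne.mpr (Ne.symm e)
      simp [h2]
  · simp [hb]

-- one pvConStep on a table shaped over tied
theorem pvConStep_shaped (assignment : List (String × Int)) (tied : List (String × List Int))
    (f : String → Nat) (c : String × String × String) :
    pvConStep assignment tied (tied.map (fun p => (p.1, f p.1))) c =
      tied.map (fun p => (p.1, f p.1 +
        ((if c.1 == p.1 && pvNotAssigned assignment c.2.2 then 1 else 0) +
         (if c.2.2 == p.1 && pvNotAssigned assignment c.1 then 1 else 0)))) := by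
  obtain ⟨a, bm, b⟩ := c
  unfold pvConStep
  rw [pvBumpIf_shaped assignment tied f a b]
  have h2 := pvBumpIf_shaped assignment tied
    (fun w => f w + (if a == w && pvNotAssigned assignment b then 1 else 0)) b a
  beta_reduce at h2
  rw [h2]
  refine List.map_congr_left fun p hp => ?_
  simp [Nat.add_assoc]

-- A's whole second loop on the shaped initial table
theorem pvCount_fold (assignment : List (String × Int)) (tied : List (String × List Int))
    (cons : List (String × String × String)) (f : String → Nat) :
    cons.foldl (pvConStep assignment tied) (tied.map (fun p => (p.1, f p.1))) =
      tied.map (fun p => (p.1, f p.1 + pvCnt assignment cons p.1)) := by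
  induction cons generalizing f with
  | nil => simp [pvCnt]
  | cons c rest ih =>
    rw [List.foldl_cons, pvConStep_shaped]
    have hih := ih (fun w => f w +
      ((if c.1 == w && pvNotAssigned assignment c.2.2 then 1 else 0) +
       (if c.2.2 == w && pvNotAssigned assignment c.1 then 1 else 0)))
    beta_reduce at hih
    rw [hih]
    refine List.map_congr_left fun p hp => ?_
    simp [pvCnt]
    omega

-- max? over an appended singleton (max? is a left fold keeping the first extremum)
theorem pvMax_append_some (l : List (String × Nat)) (x q : String × Nat)
    (h : PySem.List.max? l (fun r => r.2) = some q) :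
    PySem.List.max? (l ++ [x]) (fun r => r.2) =
      if q.2 < x.2 then some x else some q := by
  unfold PySem.List.max? at h ⊢
  rw [List.foldl_append, List.foldl_cons, List.foldl_nil, h]

theorem pvMax_singleton (x : String × Nat) :
    PySem.List.max? [x] (fun q => q.2) = some x := rfl

-- well-formedness of A's first-loop state
def pvWF (st : Option Nat × List (String × List Int)) : Prop :=
  match st.1 with
  | none => st.2 = []
  | some m => st.2 ≠ [] ∧ ∀ p ∈ st.2, p.2.length = m

-- the abstraction relating B's running best to A's first-loop state
def pvG (assignment : List (String × Int)) (cons : List (String × String × String))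
    (st : Option Nat × List (String × List Int)) : Option (String × Nat × Nat) :=
  match st.1, PySem.List.max? (st.2.map (fun p => (p.1, pvCnt assignment cons p.1))) (fun q => q.2) with
  | some m, some q => some (q.1, m, q.2)
  | _, _ => none

theorem pvStep (assignment : List (String × Int)) (cons : List (String × String × String))
    (deg : PySem.Dict String Nat)
    (hdeg : ∀ v, deg.getD v 0 = pvCnt assignment cons v)
    (st : Option Nat × List (String × List Int)) (p : String × List Int) (hwf : pvWF st) :
    pvWF (pvTieStep assignment st p) ∧
    pvBestStep assignment deg (pvG assignment cons st) p =
      pvG assignment cons (pvTieStep assignment st p) := by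
  obtain ⟨s, tied⟩ := st
  by_cases hfree : pvNotAssigned assignment p.1 = true
  · cases s with
    | none =>
      have htied : tied = [] := hwf
      subst htied
      have ht : pvTieStep assignment (none, []) p = (some p.2.length, [p]) := by
        simp [pvTieStep, hfree]
      rw [ht]
      refine ⟨⟨by simp, by simp⟩, ?_⟩
      show pvBestStep assignment deg none p = _
      simp [pvBestStep, pvG, hfree, pvMax_singleton, hdeg]
    | some m =>
      obtain ⟨hne, hlen⟩ := hwf
      obtain ⟨q, hq⟩ : ∃ q, PySem.List.max?
          (tied.map (fun r => (r.1, pvCnt assignment cons r.1))) (fun q => q.2) = some q := by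
        cases hmx : PySem.List.max? (tied.map (fun r => (r.1, pvCnt assignment cons r.1))) (fun q => q.2) with
        | none =>
          exact absurd ((PySem.List.max?_eq_none_iff _ _).mp hmx) (by simpa using hne)
        | some q => exact ⟨q, rfl⟩
      have hG : pvG assignment cons (some m, tied) = some (q.1, m, q.2) := by
        simp [pvG, hq]
      rcases Nat.lt_trichotomy p.2.length m with hlt | heq | hgt
      · have ht : pvTieStep assignment (some m, tied) p = (some p.2.length, [p]) := by
          simp [pvTieStep, hfree, hlt]
        rw [ht, hG]
        refine ⟨⟨by simp, by simp⟩, ?_⟩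
        simp [pvBestStep, pvG, hfree, hlt, pvMax_singleton, hdeg]
      · subst heq
        have ht : pvTieStep assignment (some p.2.length, tied) p = (some p.2.length, tied ++ [p]) := by
          simp [pvTieStep, hfree]
        rw [ht, hG]
        constructor
        · refine ⟨by simp, fun r hr => ?_⟩
          rcases List.mem_append.mp hr with h | h
          · exact hlen r h
          · simp at h; simp [h]
        · have hGa : pvG assignment cons (some p.2.length, tied ++ [p]) =
              (if q.2 < pvCnt assignment cons p.1
               then some (p.1, p.2.length, pvCnt assignment cons p.1)
               else some (q.1, p.2.length, q.2)) := by
            have hmm := pvMax_append_some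
              (tied.map fun r => (r.1, pvCnt assignment cons r.1))
              (p.1, pvCnt assignment cons p.1) q hq
            simp only [pvG, List.map_append, List.map_cons, List.map_nil, hmm]
            by_cases hcmp : q.2 < pvCnt assignment cons p.1 <;> simp [hcmp]
          rw [hGa]
          simp only [pvBestStep, hfree, if_true, hdeg]
          by_cases hcmp : q.2 < pvCnt assignment cons p.1 <;>
            simp [hcmp]
      · have h1 : ¬ p.2.length < m := by omega
        have h2 : ¬ p.2.length = m := by omega
        have ht : pvTieStep assignment (some m, tied) p = (some m, tied) := by
          simp [pvTieStep, hfree, h1, h2]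
        rw [ht, hG]
        refine ⟨⟨hne, hlen⟩, ?_⟩
        simp only [pvBestStep, hfree, if_true, hdeg]
        rw [if_neg (by omega)]
  · have ht : pvTieStep assignment (s, tied) p = (s, tied) := by
      simp [pvTieStep, hfree]
    rw [ht]
    exact ⟨hwf, by simp [pvBestStep, hfree]⟩

theorem pvMain (assignment : List (String × Int)) (cons : List (String × String × String))
    (deg : PySem.Dict String Nat)
    (hdeg : ∀ v, deg.getD v 0 = pvCnt assignment cons v)
    (l : List (String × List Int)) (st : Option Nat × List (String × List Int)) (hwf : pvWF st) :
    pvWF (l.foldl (pvTieStep assignment) st) ∧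
    l.foldl (pvBestStep assignment deg) (pvG assignment cons st) =
      pvG assignment cons (l.foldl (pvTieStep assignment) st) := by
  induction l generalizing st with
  | nil => exact ⟨hwf, rfl⟩
  | cons p rest ih =>
    obtain ⟨hwf', hstep⟩ := pvStep assignment cons deg hdeg st p hwf
    rw [List.foldl_cons, List.foldl_cons, hstep]
    exact ih _ hwf'

-- ===== VERDICT (by name: the statement is the Claim_ definition above) =====
theorem selectMostConstrained_spec : Claim_equal_selectMostConstrained := by
  intro vars cons assignment _ _
  unfold Spec_selectMostConstrained selectMostConstrained selectMostConstrained_alt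
  have hdeg : ∀ v, (cons.foldl (pvDegStep assignment) PySem.Dict.empty).getD v 0 =
      pvCnt assignment cons v := by
    intro v
    rw [pvDeg_getD]
    simp [PySem.Dict.getD_empty]
  obtain ⟨hwf, hfold⟩ := pvMain assignment cons _ hdeg vars (none, []) (by simp [pvWF])
  have hG0 : pvG assignment cons ((none : Option Nat), ([] : List (String × List Int))) = none := rfl
  rw [hG0] at hfold
  simp only [hfold]
  rcases hstq : List.foldl (pvTieStep assignment) ((none : Option Nat), ([] : List (String × List Int))) vars with ⟨s, tied⟩
  rw [hstq] at hwf
  cases s with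
  | none =>
    have htied : tied = [] := hwf
    subst htied
    have hempty : List.foldl (pvConStep assignment ([] : List (String × List Int)))
        ([] : List (String × Nat)) cons = [] := by
      simpa using pvCount_fold assignment [] cons (fun _ => 0)
    simp [pvG, hempty, PySem.List.max?]
  | some m =>
    obtain ⟨hne, _⟩ := hwf
    have htab := pvCount_fold assignment tied cons (fun _ => 0)
    simp only [Nat.zero_add] at htab
    cases tied with
    | nil => exact absurd rfl hne
    | cons p rest =>
      cases rest with
      | nil =>
        simp [pvG, pvMax_singleton]
      | cons p2 rest2 =>
        have hlen : ((p :: p2 :: rest2).length == 1) = false := by simp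
        simp only [hlen, Bool.false_eq_true, if_false, htab, pvG]
        cases hmx : PySem.List.max?
            ((p :: p2 :: rest2).map (fun p => (p.1, pvCnt assignment cons p.1))) (fun q => q.2) with
        | none => simp at hmx
        | some q => simp
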